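-- pv_equiv track=rewrite | github.com/vuthuyduong/dnabarcoder | aidscripts/selectsequences.py | GetTaxonName
-- ===== SOURCE A (Python) =====
-- def GetTaxonName(description, rank, taxa):
-- 	found=False
-- 	taxalist=[]
-- 	if "," in taxa:
-- 		taxalist = taxa.split(",")
-- 	elif taxa != "" and taxa != "unidentified":
-- 		taxalist.append(taxa)
-- 	else:
-- 		found=True
-- 	taxonname = ""
-- 	species = ""
-- 	genus = ""
-- 	family = ""
-- 	order = ""
-- 	bioclass = ""
-- 	phylum = ""
-- 	kingdom = ""
-- 	seqid=description
-- 	if " " in description: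
-- 		seqid=description.split(" ")[0]
-- 		description = description.split(" ")[1]
-- 	texts = description.split("|")
-- 	for text in texts:
-- 		text = text.rstrip()
-- 		taxa = text.split(";")
-- 		for taxon in taxa:
-- 			if "__" in taxon:
-- 				if taxon.split("__")[1] in taxalist:
-- 					found=True
-- 			if taxon.startswith("k__"):
-- 				kingdom = taxon.replace("k__", "")
-- 			elif taxon.startswith("p__"):
-- 				phylum = taxon.replace("p__", "")
-- 			elif taxon.startswith("c__"):
-- 				bioclass = taxon.replace("c__", "")
-- 			elif taxon.startswith("o__"):
-- 				order = taxon.replace("o__", "")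
-- 			elif taxon.startswith("f__"):
-- 				family = taxon.replace("f__", "")
-- 			elif taxon.startswith("g__"):
-- 				genus = taxon.replace("g__", "")
-- 			elif taxon.startswith("s__") and (" " in taxon.replace("s__", "") or "_" in taxon.replace("s__", "")):
-- 				species = taxon.replace("s__", "")
-- 				species = species.replace("_", " ")
-- 	if rank.lower() == "species":
-- 		taxonname = species
-- 	elif rank.lower() == "genus":
-- 		taxonname = genus
-- 	elif rank.lower() == "family":
-- 		taxonname = family
-- 	elif rank.lower() == "order":
-- 		taxonname = order
-- 	elif rank.lower() == "class":
-- 		taxonname = bioclass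
-- 	elif rank.lower() == "phylum":
-- 		taxonname = phylum
-- 	elif rank.lower() == "kingdom":
-- 		taxonname = kingdom
-- 	else:
-- 		taxonname=seqid
-- 		#taxonname=kingdom + "\t" + phylum + "\t" + bioclass + "\t" + order + "\t" + family + "\t" + genus + "\t" + species
-- 	if found==False:
-- 		taxonname=""
-- 	return taxonname
-- ===== SOURCE B (Python) =====
-- # Staged re-implementation: flatten tokens once, compute `found` with any(), then
-- # find only the requested rank by scanning the token list BACKWARDS with early return
-- # (last assignment wins), instead of A's forward pass accumulating all seven ranks.
--
-- _PREFIX = {"kingdom": "k__", "phylum": "p__", "class": "c__", "order": "o__",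
--            "family": "f__", "genus": "g__", "species": "s__"}
--
-- def GetTaxonName(description, rank, taxa):
-- 	if "," in taxa:
-- 		taxalist = taxa.split(",")
-- 	elif taxa != "" and taxa != "unidentified":
-- 		taxalist = [taxa]
-- 	else:
-- 		taxalist = None  # trivially found
-- 	seqid = description
-- 	if " " in description:
-- 		seqid = description.split(" ")[0]
-- 		description = description.split(" ")[1]
-- 	tokens = [tok for text in description.split("|") for tok in text.rstrip().split(";")]
-- 	found = taxalist is None or any(
-- 		"__" in tok and tok.split("__")[1] in taxalist for tok in tokens)
-- 	if not found:
-- 		return ""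
-- 	pfx = _PREFIX.get(rank.lower())
-- 	if pfx is None:
-- 		return seqid
-- 	for tok in reversed(tokens):
-- 		if tok.startswith(pfx):
-- 			name = tok.replace(pfx, "")
-- 			if pfx != "s__":
-- 				return name
-- 			if " " in name or "_" in name:
-- 				return name.replace("_", " ")
-- 	return ""
-- ===== Notes on version B (the rewrite author's own statement) =====
-- stated objective: alternative
-- what changed: Instead of A's single forward pass accumulating all seven rank variables and selecting at the end, B flattens the tokens once, decides `found` with a separate any() pass, and then computes only the requested rank by scanning the token list backwards with an early return (last assignment wins).
import Mathlib
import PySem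

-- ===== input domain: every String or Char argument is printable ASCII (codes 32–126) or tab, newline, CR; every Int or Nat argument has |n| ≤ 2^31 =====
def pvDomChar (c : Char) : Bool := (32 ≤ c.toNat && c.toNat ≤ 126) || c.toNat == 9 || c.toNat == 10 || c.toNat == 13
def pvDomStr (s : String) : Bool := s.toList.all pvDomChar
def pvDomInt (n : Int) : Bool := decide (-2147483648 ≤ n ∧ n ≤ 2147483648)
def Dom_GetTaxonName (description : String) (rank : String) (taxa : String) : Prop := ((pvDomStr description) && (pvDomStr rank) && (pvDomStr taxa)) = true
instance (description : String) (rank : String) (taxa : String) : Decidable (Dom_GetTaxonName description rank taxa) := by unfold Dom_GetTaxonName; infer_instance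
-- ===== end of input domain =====

-- B flattens the tokens, decides `found` with one any() pass, and extracts only the
-- requested rank by a backward scan with early return (objective: alternative decomposition);
-- same return value everywhere.

-- ===== PORT A =====
structure PvStA where
  found : Bool
  kingdom : String
  phylum : String
  bioclass : String
  order : String
  family : String
  genus : String
  species : String
deriving Repr, DecidableEq

def pvATaxon (taxalist : List String) (st : PvStA) (taxon : String) : PvStA :=
  let st :=
    if PySem.Str.isIn "__" taxon then
      if taxalist.contains (PySem.List.pyGetD ((PySem.Str.split? taxon "__").getD []) 1 "") then
        { st with found := true }
      else st
    else st
  if PySem.Str.startswith taxon "k__" then { st with kingdom := PySem.Str.replace taxon "k__" "" }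
  else if PySem.Str.startswith taxon "p__" then { st with phylum := PySem.Str.replace taxon "p__" "" }
  else if PySem.Str.startswith taxon "c__" then { st with bioclass := PySem.Str.replace taxon "c__" "" }
  else if PySem.Str.startswith taxon "o__" then { st with order := PySem.Str.replace taxon "o__" "" }
  else if PySem.Str.startswith taxon "f__" then { st with family := PySem.Str.replace taxon "f__" "" }
  else if PySem.Str.startswith taxon "g__" then { st with genus := PySem.Str.replace taxon "g__" "" }
  else if PySem.Str.startswith taxon "s__" &&
      (PySem.Str.isIn " " (PySem.Str.replace taxon "s__" "") ||
       PySem.Str.isIn "_" (PySem.Str.replace taxon "s__" "")) then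
    { st with species := PySem.Str.replace (PySem.Str.replace taxon "s__" "") "_" " " }
  else st

def pvAText (taxalist : List String) (st : PvStA) (text : String) : PvStA :=
  ((PySem.Str.split? (PySem.Str.rstrip text) ";").getD []).foldl (pvATaxon taxalist) st

def GetTaxonName (description : String) (rank : String) (taxa : String) : String :=
  let found0 : Bool :=
    if PySem.Str.isIn "," taxa then false
    else if taxa ≠ "" ∧ taxa ≠ "unidentified" then false
    else true
  let taxalist : List String :=
    if PySem.Str.isIn "," taxa then (PySem.Str.split? taxa ",").getD []
    else if taxa ≠ "" ∧ taxa ≠ "unidentified" then [taxa]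
    else []
  let seqid :=
    if PySem.Str.isIn " " description then
      PySem.List.pyGetD ((PySem.Str.split? description " ").getD []) 0 ""
    else description
  let desc :=
    if PySem.Str.isIn " " description then
      PySem.List.pyGetD ((PySem.Str.split? description " ").getD []) 1 ""
    else description
  let st := ((PySem.Str.split? desc "|").getD []).foldl (pvAText taxalist)
    ⟨found0, "", "", "", "", "", "", ""⟩
  let rl := PySem.Str.lower rank
  let taxonname :=
    if rl = "species" then st.species
    else if rl = "genus" then st.genus
    else if rl = "family" then st.family
    else if rl = "order" then st.order
    else if rl = "class" then st.bioclass
    else if rl = "phylum" then st.phylum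
    else if rl = "kingdom" then st.kingdom
    else seqid
  if st.found = false then "" else taxonname

-- ===== PORT B =====
def pvPrefix : PySem.Dict String String :=
  PySem.Dict.ofList [("kingdom", "k__"), ("phylum", "p__"), ("class", "c__"), ("order", "o__"),
    ("family", "f__"), ("genus", "g__"), ("species", "s__")]

/-- the flattened token comprehension of Source B -/
def pvToks (desc : String) : List String :=
  ((PySem.Str.split? desc "|").getD []).flatMap
    (fun text => (PySem.Str.split? (PySem.Str.rstrip text) ";").getD [])

/-- Source B's backward `for tok in reversed(tokens)` loop with early returns (applied to the
    already-reversed list; falls through to `""`). -/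
def pvScan (pfx : String) : List String → String
  | [] => ""
  | tok :: rest =>
      if PySem.Str.startswith tok pfx then
        let name := PySem.Str.replace tok pfx ""
        if pfx ≠ "s__" then name
        else if PySem.Str.isIn " " name || PySem.Str.isIn "_" name then
          PySem.Str.replace name "_" " "
        else pvScan pfx rest
      else pvScan pfx rest

def GetTaxonName_alt (description : String) (rank : String) (taxa : String) : String :=
  let taxalistOpt : Option (List String) :=
    if PySem.Str.isIn "," taxa then some ((PySem.Str.split? taxa ",").getD [])
    else if taxa ≠ "" ∧ taxa ≠ "unidentified" then some [taxa]
    else none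
  let seqid :=
    if PySem.Str.isIn " " description then
      PySem.List.pyGetD ((PySem.Str.split? description " ").getD []) 0 ""
    else description
  let desc :=
    if PySem.Str.isIn " " description then
      PySem.List.pyGetD ((PySem.Str.split? description " ").getD []) 1 ""
    else description
  let tokens := pvToks desc
  let found : Bool :=
    match taxalistOpt with
    | none => true
    | some tl =>
        tokens.any (fun tok => PySem.Str.isIn "__" tok &&
          tl.contains (PySem.List.pyGetD ((PySem.Str.split? tok "__").getD []) 1 ""))
  if !found then ""
  else
    match pvPrefix.get? (PySem.Str.lower rank) with
    | none => seqid
    | some pfx => pvScan pfx tokens.reverse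

-- ===== PRECONDITION & SPEC =====
def Spec_GetTaxonName (description : String) (rank : String) (taxa : String) (out : String) : Prop := out = GetTaxonName_alt description rank taxa
instance (description : String) (rank : String) (taxa : String) (out : String) : Decidable (Spec_GetTaxonName description rank taxa out) := by unfold Spec_GetTaxonName; infer_instance

-- ===== CLAIM =====
def Claim_equal_GetTaxonName : Prop := ∀ (description : String) (rank : String) (taxa : String), Dom_GetTaxonName description rank taxa → Spec_GetTaxonName description rank taxa (GetTaxonName description rank taxa)

-- ===== LEMMAS AND PROOFS =====

/-- proof-side generalisation of `pvScan` with an arbitrary fall-through value (base of the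
    invariant for A's fold, whose accumulator field may already be non-empty). -/
def pvScanD (pfx d : String) : List String → String
  | [] => d
  | tok :: rest =>
      if PySem.Str.startswith tok pfx then
        let name := PySem.Str.replace tok pfx ""
        if pfx ≠ "s__" then name
        else if PySem.Str.isIn " " name || PySem.Str.isIn "_" name then
          PySem.Str.replace name "_" " "
        else pvScanD pfx d rest
      else pvScanD pfx d rest

lemma pvScan_eq_scanD (pfx : String) (l : List String) : pvScan pfx l = pvScanD pfx "" l := by
  induction l with
  | nil => rfl
  | cons t r ih => simp only [pvScan, pvScanD, ih]

/-- two nonempty prefixes with different first characters cannot both be prefixes of `t`. -/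
lemma pvExcl (t p q : String) (a b : Char) (hp : p.toList.head? = some a)
    (hq : q.toList.head? = some b) (hab : a ≠ b) :
    ¬(PySem.Str.startswith t p = true ∧ PySem.Str.startswith t q = true) := by
  rintro ⟨h1, h2⟩
  rw [PySem.Str.startswith_eq, PySem.Chars.startswith_iff] at h1 h2
  obtain ⟨s1, hs1⟩ := h1
  obtain ⟨s2, hs2⟩ := h2
  have e1 : t.toList.head? = some a := by
    rw [← hs1, List.head?_append_of_ne_nil]
    · exact hp
    · intro hnil; rw [hnil] at hp; simp at hp
  have e2 : t.toList.head? = some b := by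
    rw [← hs2, List.head?_append_of_ne_nil]
    · exact hq
    · intro hnil; rw [hnil] at hq; simp at hq
  rw [e1] at e2
  exact hab (by injection e2)

/-- implication form used by `simp_all`: if the `q` prefix matches then the `p` one does not. -/
lemma pvNotBoth (t p q : String) (a b : Char) (hp : p.toList.head? = some a)
    (hq : q.toList.head? = some b) (hab : a ≠ b) (h : PySem.Str.startswith t q = true) :
    PySem.Str.startswith t p = false := by
  cases hh : PySem.Str.startswith t p with
  | false => rfl
  | true => exact absurd ⟨hh, h⟩ (pvExcl t p q a b hp hq hab)

/-- flattening: A's nested fold over texts = fold of `pvATaxon` over the flat token list. -/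
lemma pvFlatten (tl : List String) (texts : List String) (st : PvStA) :
    texts.foldl (pvAText tl) st =
      (texts.flatMap
        (fun text => (PySem.Str.split? (PySem.Str.rstrip text) ";").getD [])).foldl
        (pvATaxon tl) st := by
  induction texts generalizing st with
  | nil => rfl
  | cons x xs ih =>
      simp only [List.foldl_cons, List.flatMap_cons, List.foldl_append]
      exact ih _

def pvPred (tl : List String) (tok : String) : Bool :=
  PySem.Str.isIn "__" tok &&
    tl.contains (PySem.List.pyGetD ((PySem.Str.split? tok "__").getD []) 1 "")

lemma pvA_found (tl : List String) (st : PvStA) (t : String) :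
    (pvATaxon tl st t).found = (st.found || pvPred tl t) := by
  unfold pvATaxon pvPred; split_ifs <;> simp_all

lemma pvFold_found (tl : List String) (l : List String) (st : PvStA) :
    (l.foldl (pvATaxon tl) st).found = (st.found || l.any (pvPred tl)) := by
  induction l generalizing st with
  | nil => simp
  | cons x xs ih =>
      simp only [List.foldl_cons, List.any_cons, ih, pvA_found, Bool.or_assoc]

-- chained (elif-shaped) field-update lemmas; all by unfolding
lemma pvA_kingdomC (tl : List String) (st : PvStA) (t : String) :
    (pvATaxon tl st t).kingdom =
      if PySem.Str.startswith t "k__" = true then PySem.Str.replace t "k__" "" else st.kingdom := by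
  unfold pvATaxon; split_ifs <;> rfl

lemma pvA_phylumC (tl : List String) (st : PvStA) (t : String) :
    (pvATaxon tl st t).phylum =
      if PySem.Str.startswith t "k__" = true then st.phylum
      else if PySem.Str.startswith t "p__" = true then PySem.Str.replace t "p__" ""
      else st.phylum := by
  unfold pvATaxon; split_ifs <;> rfl

lemma pvA_bioclassC (tl : List String) (st : PvStA) (t : String) :
    (pvATaxon tl st t).bioclass =
      if PySem.Str.startswith t "k__" = true then st.bioclass
      else if PySem.Str.startswith t "p__" = true then st.bioclass
      else if PySem.Str.startswith t "c__" = true then PySem.Str.replace t "c__" ""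
      else st.bioclass := by
  unfold pvATaxon; split_ifs <;> rfl

lemma pvA_orderC (tl : List String) (st : PvStA) (t : String) :
    (pvATaxon tl st t).order =
      if PySem.Str.startswith t "k__" = true then st.order
      else if PySem.Str.startswith t "p__" = true then st.order
      else if PySem.Str.startswith t "c__" = true then st.order
      else if PySem.Str.startswith t "o__" = true then PySem.Str.replace t "o__" ""
      else st.order := by
  unfold pvATaxon; split_ifs <;> rfl

lemma pvA_familyC (tl : List String) (st : PvStA) (t : String) :
    (pvATaxon tl st t).family =
      if PySem.Str.startswith t "k__" = true then st.family
      else if PySem.Str.startswith t "p__" = true then st.family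
      else if PySem.Str.startswith t "c__" = true then st.family
      else if PySem.Str.startswith t "o__" = true then st.family
      else if PySem.Str.startswith t "f__" = true then PySem.Str.replace t "f__" ""
      else st.family := by
  unfold pvATaxon; split_ifs <;> rfl

lemma pvA_genusC (tl : List String) (st : PvStA) (t : String) :
    (pvATaxon tl st t).genus =
      if PySem.Str.startswith t "k__" = true then st.genus
      else if PySem.Str.startswith t "p__" = true then st.genus
      else if PySem.Str.startswith t "c__" = true then st.genus
      else if PySem.Str.startswith t "o__" = true then st.genus
      else if PySem.Str.startswith t "f__" = true then st.genus
      else if PySem.Str.startswith t "g__" = true then PySem.Str.replace t "g__" ""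
      else st.genus := by
  unfold pvATaxon; split_ifs <;> rfl

lemma pvA_speciesC (tl : List String) (st : PvStA) (t : String) :
    (pvATaxon tl st t).species =
      if PySem.Str.startswith t "k__" = true then st.species
      else if PySem.Str.startswith t "p__" = true then st.species
      else if PySem.Str.startswith t "c__" = true then st.species
      else if PySem.Str.startswith t "o__" = true then st.species
      else if PySem.Str.startswith t "f__" = true then st.species
      else if PySem.Str.startswith t "g__" = true then st.species
      else if (PySem.Str.startswith t "s__" &&
          (PySem.Str.isIn " " (PySem.Str.replace t "s__" "") ||
           PySem.Str.isIn "_" (PySem.Str.replace t "s__" ""))) = true then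
        PySem.Str.replace (PySem.Str.replace t "s__" "") "_" " "
      else st.species := by
  unfold pvATaxon; split_ifs <;> rfl

-- single-condition forms (the seven startswith tests are mutually exclusive)
lemma pvU_phylum (tl : List String) (st : PvStA) (t : String) :
    (pvATaxon tl st t).phylum =
      if PySem.Str.startswith t "p__" = true then PySem.Str.replace t "p__" "" else st.phylum := by
  have h1 := pvNotBoth t "k__" "p__" 'k' 'p' rfl rfl (by decide)
  rw [pvA_phylumC]; split_ifs <;> simp_all

lemma pvU_bioclass (tl : List String) (st : PvStA) (t : String) :
    (pvATaxon tl st t).bioclass =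
      if PySem.Str.startswith t "c__" = true then PySem.Str.replace t "c__" "" else st.bioclass := by
  have h1 := pvNotBoth t "k__" "c__" 'k' 'c' rfl rfl (by decide)
  have h2 := pvNotBoth t "p__" "c__" 'p' 'c' rfl rfl (by decide)
  rw [pvA_bioclassC]; split_ifs <;> simp_all

lemma pvU_order (tl : List String) (st : PvStA) (t : String) :
    (pvATaxon tl st t).order =
      if PySem.Str.startswith t "o__" = true then PySem.Str.replace t "o__" "" else st.order := by
  have h1 := pvNotBoth t "k__" "o__" 'k' 'o' rfl rfl (by decide)
  have h2 := pvNotBoth t "p__" "o__" 'p' 'o' rfl rfl (by decide)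
  have h3 := pvNotBoth t "c__" "o__" 'c' 'o' rfl rfl (by decide)
  rw [pvA_orderC]; split_ifs <;> simp_all

lemma pvU_family (tl : List String) (st : PvStA) (t : String) :
    (pvATaxon tl st t).family =
      if PySem.Str.startswith t "f__" = true then PySem.Str.replace t "f__" "" else st.family := by
  have h1 := pvNotBoth t "k__" "f__" 'k' 'f' rfl rfl (by decide)
  have h2 := pvNotBoth t "p__" "f__" 'p' 'f' rfl rfl (by decide)
  have h3 := pvNotBoth t "c__" "f__" 'c' 'f' rfl rfl (by decide)
  have h4 := pvNotBoth t "o__" "f__" 'o' 'f' rfl rfl (by decide)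
  rw [pvA_familyC]; split_ifs <;> simp_all

lemma pvU_genus (tl : List String) (st : PvStA) (t : String) :
    (pvATaxon tl st t).genus =
      if PySem.Str.startswith t "g__" = true then PySem.Str.replace t "g__" "" else st.genus := by
  have h1 := pvNotBoth t "k__" "g__" 'k' 'g' rfl rfl (by decide)
  have h2 := pvNotBoth t "p__" "g__" 'p' 'g' rfl rfl (by decide)
  have h3 := pvNotBoth t "c__" "g__" 'c' 'g' rfl rfl (by decide)
  have h4 := pvNotBoth t "o__" "g__" 'o' 'g' rfl rfl (by decide)
  have h5 := pvNotBoth t "f__" "g__" 'f' 'g' rfl rfl (by decide)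
  rw [pvA_genusC]; split_ifs <;> simp_all

lemma pvU_species (tl : List String) (st : PvStA) (t : String) :
    (pvATaxon tl st t).species =
      if PySem.Str.startswith t "s__" = true then
        if (PySem.Str.isIn " " (PySem.Str.replace t "s__" "") ||
            PySem.Str.isIn "_" (PySem.Str.replace t "s__" "")) = true then
          PySem.Str.replace (PySem.Str.replace t "s__" "") "_" " "
        else st.species
      else st.species := by
  have h1 := pvNotBoth t "k__" "s__" 'k' 's' rfl rfl (by decide)
  have h2 := pvNotBoth t "p__" "s__" 'p' 's' rfl rfl (by decide)
  have h3 := pvNotBoth t "c__" "s__" 'c' 's' rfl rfl (by decide)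
  have h4 := pvNotBoth t "o__" "s__" 'o' 's' rfl rfl (by decide)
  have h5 := pvNotBoth t "f__" "s__" 'f' 's' rfl rfl (by decide)
  have h6 := pvNotBoth t "g__" "s__" 'g' 's' rfl rfl (by decide)
  rw [pvA_speciesC]; split_ifs <;> simp_all

/-- generic: A's forward last-assignment fold of a non-species field = backward first-match scan. -/
lemma pvFoldField (tl : List String) (pfx : String) (hp : pfx ≠ "s__") (get : PvStA → String)
    (hupd : ∀ st t, get (pvATaxon tl st t) =
      if PySem.Str.startswith t pfx = true then PySem.Str.replace t pfx "" else get st)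
    (l : List String) (st : PvStA) :
    get (l.foldl (pvATaxon tl) st) = pvScanD pfx (get st) l.reverse := by
  induction l using List.reverseRecOn with
  | nil => rfl
  | append_singleton l t ih =>
      rw [List.foldl_append, List.reverse_append]
      simp only [List.foldl_cons, List.foldl_nil, List.reverse_singleton, List.singleton_append,
        pvScanD, hupd]
      split_ifs with h
      · simp [hp]
      · exact ih

/-- same for the species field with its guard. -/
lemma pvFoldSpecies (tl : List String) (l : List String) (st : PvStA) :
    (l.foldl (pvATaxon tl) st).species = pvScanD "s__" st.species l.reverse := by
  induction l using List.reverseRecOn with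
  | nil => rfl
  | append_singleton l t ih =>
      rw [List.foldl_append, List.reverse_append]
      simp only [List.foldl_cons, List.foldl_nil, List.reverse_singleton, List.singleton_append,
        pvScanD, pvU_species]
      split_ifs with h1 h2 <;> simp_all

/-- the assembled tail: A's select-from-accumulators = B's found test + backward rank scan. -/
lemma pvMain (tl : List String) (f0 : Bool) (sq rl : String) (texts : List String) :
    (if (texts.foldl (pvAText tl) ⟨f0, "", "", "", "", "", "", ""⟩).found = false then ""
     else if rl = "species" then (texts.foldl (pvAText tl) ⟨f0, "", "", "", "", "", "", ""⟩).species
     else if rl = "genus" then (texts.foldl (pvAText tl) ⟨f0, "", "", "", "", "", "", ""⟩).genus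
     else if rl = "family" then (texts.foldl (pvAText tl) ⟨f0, "", "", "", "", "", "", ""⟩).family
     else if rl = "order" then (texts.foldl (pvAText tl) ⟨f0, "", "", "", "", "", "", ""⟩).order
     else if rl = "class" then (texts.foldl (pvAText tl) ⟨f0, "", "", "", "", "", "", ""⟩).bioclass
     else if rl = "phylum" then (texts.foldl (pvAText tl) ⟨f0, "", "", "", "", "", "", ""⟩).phylum
     else if rl = "kingdom" then (texts.foldl (pvAText tl) ⟨f0, "", "", "", "", "", "", ""⟩).kingdom
     else sq) =
    (if !(f0 || (texts.flatMap
          (fun text => (PySem.Str.split? (PySem.Str.rstrip text) ";").getD [])).any (pvPred tl))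
     then ""
     else
       match pvPrefix.get? rl with
       | none => sq
       | some pfx =>
           pvScan pfx (texts.flatMap
             (fun text => (PySem.Str.split? (PySem.Str.rstrip text) ";").getD [])).reverse) := by
  rw [pvFlatten]
  set T := texts.flatMap
      (fun text => (PySem.Str.split? (PySem.Str.rstrip text) ";").getD []) with hT
  have hfound : (T.foldl (pvATaxon tl) ⟨f0, "", "", "", "", "", "", ""⟩).found =
      (f0 || T.any (pvPred tl)) := pvFold_found tl T _
  have hking : (T.foldl (pvATaxon tl) ⟨f0, "", "", "", "", "", "", ""⟩).kingdom =
      pvScan "k__" T.reverse := by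
    rw [pvFoldField tl "k__" (by decide) PvStA.kingdom (fun st t => pvA_kingdomC tl st t) T _,
      pvScan_eq_scanD]
  have hphy : (T.foldl (pvATaxon tl) ⟨f0, "", "", "", "", "", "", ""⟩).phylum =
      pvScan "p__" T.reverse := by
    rw [pvFoldField tl "p__" (by decide) PvStA.phylum (fun st t => pvU_phylum tl st t) T _,
      pvScan_eq_scanD]
  have hcls : (T.foldl (pvATaxon tl) ⟨f0, "", "", "", "", "", "", ""⟩).bioclass =
      pvScan "c__" T.reverse := by
    rw [pvFoldField tl "c__" (by decide) PvStA.bioclass (fun st t => pvU_bioclass tl st t) T _,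
      pvScan_eq_scanD]
  have hord : (T.foldl (pvATaxon tl) ⟨f0, "", "", "", "", "", "", ""⟩).order =
      pvScan "o__" T.reverse := by
    rw [pvFoldField tl "o__" (by decide) PvStA.order (fun st t => pvU_order tl st t) T _,
      pvScan_eq_scanD]
  have hfam : (T.foldl (pvATaxon tl) ⟨f0, "", "", "", "", "", "", ""⟩).family =
      pvScan "f__" T.reverse := by
    rw [pvFoldField tl "f__" (by decide) PvStA.family (fun st t => pvU_family tl st t) T _,
      pvScan_eq_scanD]
  have hgen : (T.foldl (pvATaxon tl) ⟨f0, "", "", "", "", "", "", ""⟩).genus =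
      pvScan "g__" T.reverse := by
    rw [pvFoldField tl "g__" (by decide) PvStA.genus (fun st t => pvU_genus tl st t) T _,
      pvScan_eq_scanD]
  have hspc : (T.foldl (pvATaxon tl) ⟨f0, "", "", "", "", "", "", ""⟩).species =
      pvScan "s__" T.reverse := by
    rw [pvFoldSpecies, pvScan_eq_scanD]
  rw [hfound]
  cases hb : (f0 || T.any (pvPred tl))
  · rfl
  · simp only [show (true = false) = False by simp, show ((!true) = true) = False by simp,
      if_false]
    by_cases r1 : rl = "species"
    · subst r1; rw [hspc]; rfl
    by_cases r2 : rl = "genus"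
    · subst r2; simp [r1, hgen]; rfl
    by_cases r3 : rl = "family"
    · subst r3; simp [hfam]; rfl
    by_cases r4 : rl = "order"
    · subst r4; simp [hord]; rfl
    by_cases r5 : rl = "class"
    · subst r5; simp [hcls]; rfl
    by_cases r6 : rl = "phylum"
    · subst r6; simp [hphy]; rfl
    by_cases r7 : rl = "kingdom"
    · subst r7; simp [hking]; rfl
    · have n1 : ("kingdom" == rl) = false := by simp; exact fun h => r7 h.symm
      have n2 : ("phylum" == rl) = false := by simp; exact fun h => r6 h.symm
      have n3 : ("class" == rl) = false := by simp; exact fun h => r5 h.symm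
      have n4 : ("order" == rl) = false := by simp; exact fun h => r4 h.symm
      have n5 : ("family" == rl) = false := by simp; exact fun h => r3 h.symm
      have n6 : ("genus" == rl) = false := by simp; exact fun h => r2 h.symm
      have n7 : ("species" == rl) = false := by simp; exact fun h => r1 h.symm
      have hg : pvPrefix.get? rl = none := by
        rw [show pvPrefix = (⟨[("kingdom", "k__"), ("phylum", "p__"), ("class", "c__"),
          ("order", "o__"), ("family", "f__"), ("genus", "g__"), ("species", "s__")]⟩ :
          PySem.Dict String String) from rfl]
        simp [PySem.Dict.get?_mk_cons, n1, n2, n3, n4, n5, n6, n7]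
        rfl
      simp [r1, r2, r3, r4, r5, r6, r7, hg]

-- ===== VERDICT =====
theorem GetTaxonName_spec : Claim_equal_GetTaxonName := by
  unfold Claim_equal_GetTaxonName
  intro description rank taxa _
  unfold Spec_GetTaxonName GetTaxonName GetTaxonName_alt pvToks
  by_cases hc : PySem.Str.isIn "," taxa = true
  · simp only [hc, if_true]
    rw [pvMain]
    simp only [Bool.false_or]
    rfl
  · by_cases hu : taxa ≠ "" ∧ taxa ≠ "unidentified"
    · simp only [hc, hu, if_true, Bool.false_eq_true, if_false]
      rw [pvMain]
      simp [pvPred, hu.1, hu.2]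
    · simp only [hc, hu, Bool.false_eq_true, if_false]
      rw [pvMain]
      simp [pvPred]
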